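-- pv_equiv track=rewrite | github.com/LOKTSN/cortex | backend/server.py | _extract_tldr_summary
-- ===== SOURCE A (Python) =====
-- def _extract_tldr_summary(synthesis: str) -> tuple[str, str]:
--     """Parse synthesis.md to extract (tldr, summary).
--
--     Looks for a **TL;DR:** prefix line; falls back to first paragraph.
--     """
--     tldr = ""
--     summary = ""
--     for line in synthesis.split("\n"):
--         stripped = line.strip()
--         if not stripped or stripped.startswith("#"):
--             continue
--         if stripped.startswith("**TL;DR:**") or stripped.startswith("**TL;DR**"):
--             tldr = stripped.split(":", 1)[-1].strip().strip("*").strip()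
--             if not summary:
--                 summary = tldr
--         elif not summary:
--             summary = stripped
--     if not tldr:
--         tldr = summary[:250] if summary else ""
--     return tldr, summary
-- ===== SOURCE B (Python) =====
-- def _extract_tldr_summary(synthesis: str) -> tuple[str, str]:
--     """Parse synthesis.md to extract (tldr, summary) — pipeline decomposition."""
--     def is_tldr(l):
--         return l.startswith("**TL;DR:**") or l.startswith("**TL;DR**")
--
--     def parse(l):
--         return l.split(":", 1)[-1].strip().strip("*").strip()
--
--     lines = [l for l in (raw.strip() for raw in synthesis.split("\n"))
--              if l and not l.startswith("#")]
--     vals = [parse(l) if is_tldr(l) else l for l in lines]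
--     summary = next((v for v in vals if v), "")
--     tldr_lines = [l for l in lines if is_tldr(l)]
--     tldr = parse(tldr_lines[-1]) if tldr_lines else ""
--     if not tldr:
--         tldr = summary[:250]
--     return tldr, summary
-- ===== Notes on version B (the rewrite author's own statement) =====
-- stated objective: alternative
-- what changed: Replaced A's single stateful loop carrying two accumulators (last-write tldr, first-write summary) by a filter/map pipeline: filter the stripped non-empty non-heading lines once, take the first non-empty parsed value as summary and the parse of the last TL;DR line as tldr, then apply the same [:250] fallback.
import Mathlib
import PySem

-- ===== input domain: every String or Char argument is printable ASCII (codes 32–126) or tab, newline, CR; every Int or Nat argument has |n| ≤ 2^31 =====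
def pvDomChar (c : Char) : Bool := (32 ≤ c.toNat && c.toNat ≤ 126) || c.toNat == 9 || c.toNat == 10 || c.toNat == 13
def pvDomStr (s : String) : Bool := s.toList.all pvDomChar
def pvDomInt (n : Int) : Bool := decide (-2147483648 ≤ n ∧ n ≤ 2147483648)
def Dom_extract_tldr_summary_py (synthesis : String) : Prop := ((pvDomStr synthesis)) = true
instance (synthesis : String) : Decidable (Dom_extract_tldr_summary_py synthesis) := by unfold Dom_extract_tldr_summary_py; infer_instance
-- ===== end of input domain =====

-- B replaces A's stateful single loop (two accumulators with overwrite/first-write rules)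
-- by a filter/map pipeline: summary = first non-empty parsed value, tldr = parse of the last
-- TL;DR line, then the same [:250] fallback. Objective: alternative decomposition (same cost).

-- shared by both ports (the parse expression is textually identical in Source A and Source B):
-- line.split(":", 1)[-1].strip().strip("*").strip()  (splitMax? with sep ":" ≠ "" never returns
-- none, and always yields a non-empty list, so [-1] never raises; pyGetD's default is unreachable)
def pvParseTldr (l : String) : String :=
  PySem.Str.strip (PySem.Str.stripChars
    (PySem.Str.strip (PySem.List.pyGetD ((PySem.Str.splitMax? l ":" 1).getD []) (-1) "")) "*")

-- ===== PORT A =====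

-- the loop body of A: state = (tldr, summary)
def pvStepA (st : String × String) (line : String) : String × String :=
  let stripped := PySem.Str.strip line
  if stripped = "" || PySem.Str.startswith stripped "#" then st
  else if PySem.Str.startswith stripped "**TL;DR:**" || PySem.Str.startswith stripped "**TL;DR**" then
    let t := pvParseTldr stripped
    (t, if st.2 = "" then t else st.2)
  else if st.2 = "" then (st.1, stripped)
  else st

def extract_tldr_summary_py (synthesis : String) : String × String :=
  -- split? with sep "\n" ≠ "" never returns none
  let st := (((PySem.Str.split? synthesis "\n").getD []).foldl pvStepA ("", ""))
  let tldr := st.1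
  let summary := st.2
  let tldr := if tldr = "" then (if summary = "" then "" else PySem.Str.slice summary none (some 250)) else tldr
  (tldr, summary)

-- ===== PORT B =====
def pvIsTldrB (l : String) : Bool :=
  PySem.Str.startswith l "**TL;DR:**" || PySem.Str.startswith l "**TL;DR**"

def pvKeepB (l : String) : Bool := l != "" && !PySem.Str.startswith l "#"

def pvValB (l : String) : String := if pvIsTldrB l then pvParseTldr l else l

def extract_tldr_summary_py_alt (synthesis : String) : String × String :=
  let lines := ((((PySem.Str.split? synthesis "\n").getD []).map PySem.Str.strip).filter pvKeepB)
  let vals := lines.map pvValB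
  let summary := ((vals.filter (fun v => v != "")).head?).getD ""
  let tldrLines := lines.filter pvIsTldrB
  let tldr := match tldrLines.getLast? with
              | some l => pvParseTldr l
              | none => ""
  let tldr := if tldr = "" then PySem.Str.slice summary none (some 250) else tldr
  (tldr, summary)

-- ===== PRECONDITION & SPEC =====
def Spec_extract_tldr_summary_py (synthesis : String) (out : String × String) : Prop := out = extract_tldr_summary_py_alt synthesis
instance (synthesis : String) (out : String × String) : Decidable (Spec_extract_tldr_summary_py synthesis out) := by unfold Spec_extract_tldr_summary_py; infer_instance

-- ===== CLAIM (what is proved, stated in full; the proofs are below) =====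
def Claim_equal_extract_tldr_summary_py : Prop := ∀ (synthesis : String), Dom_extract_tldr_summary_py synthesis → Spec_extract_tldr_summary_py synthesis (extract_tldr_summary_py synthesis)

-- ===== LEMMAS AND PROOFS =====

-- the loop of A, from an arbitrary state, computes B's pipeline values
theorem pvLoop_eq (lines : List String) (t s : String) :
    lines.foldl pvStepA (t, s) =
      ((match (((lines.map PySem.Str.strip).filter pvKeepB).filter pvIsTldrB).getLast? with
        | some l => pvParseTldr l
        | none => t),
       (if s = "" then
          (((((lines.map PySem.Str.strip).filter pvKeepB).map pvValB).filter (fun v => v != "")).head?).getD ""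
        else s)) := by
  induction lines generalizing t s with
  | nil => simp
  | cons l ls ih =>
    simp only [List.foldl_cons, List.map_cons]
    by_cases hk : pvKeepB (PySem.Str.strip l) = true
    · -- the line is kept
      have hk' := hk
      simp only [pvKeepB, Bool.and_eq_true, bne_iff_ne, ne_eq, Bool.not_eq_true'] at hk'
      have hcond : (decide (PySem.Str.strip l = "") || PySem.Str.startswith (PySem.Str.strip l) "#") = false := by
        rw [hk'.2, Bool.or_false, decide_eq_false hk'.1]
      rw [List.filter_cons_of_pos hk]
      by_cases ht : pvIsTldrB (PySem.Str.strip l) = true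
      · -- a TL;DR line
        have ht' : (PySem.Str.startswith (PySem.Str.strip l) "**TL;DR:**" ||
            PySem.Str.startswith (PySem.Str.strip l) "**TL;DR**") = true := ht
        have hstep : pvStepA (t, s) l =
            (pvParseTldr (PySem.Str.strip l),
             if s = "" then pvParseTldr (PySem.Str.strip l) else s) := by
          simp only [pvStepA]
          rw [hcond, ht']
          simp
        rw [hstep, ih]
        rw [List.filter_cons_of_pos ht, List.map_cons]
        have hv : pvValB (PySem.Str.strip l) = pvParseTldr (PySem.Str.strip l) := by
          simp [pvValB, ht]
        rw [Prod.mk.injEq]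
        refine ⟨?_, ?_⟩
        · rw [List.getLast?_cons]
          cases (((ls.map PySem.Str.strip).filter pvKeepB).filter pvIsTldrB).getLast? <;> simp
        · by_cases hs : s = ""
          · rw [if_pos hs, if_pos hs, hv]
            by_cases hp : pvParseTldr (PySem.Str.strip l) = ""
            · rw [List.filter_cons_of_neg (by simp [hp])]
              simp [hp]
            · rw [List.filter_cons_of_pos (by simp [hp])]
              simp [hp]
          · simp only [if_neg hs]
      · -- an ordinary kept line
        have ht' : (PySem.Str.startswith (PySem.Str.strip l) "**TL;DR:**" ||
            PySem.Str.startswith (PySem.Str.strip l) "**TL;DR**") = false := by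
          simpa [pvIsTldrB] using ht
        have hstep : pvStepA (t, s) l = (t, if s = "" then PySem.Str.strip l else s) := by
          simp only [pvStepA]
          rw [hcond, ht']
          by_cases hs : s = "" <;> simp [hs]
        rw [hstep, ih]
        have htb : pvIsTldrB (PySem.Str.strip l) = false := by simpa using ht
        rw [List.filter_cons_of_neg (by simp [htb]), List.map_cons]
        have hv : pvValB (PySem.Str.strip l) = PySem.Str.strip l := by
          simp [pvValB, htb]
        rw [Prod.mk.injEq]
        refine ⟨?_, ?_⟩
        · rfl
        · have hlne : PySem.Str.strip l ≠ "" := by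
            simp only [pvKeepB, Bool.and_eq_true, bne_iff_ne, ne_eq] at hk
            exact hk.1
          by_cases hs : s = ""
          · rw [if_pos hs, if_pos hs, hv]
            rw [List.filter_cons_of_pos (by simpa using hlne)]
            simp [hlne]
          · simp only [if_neg hs]
    · -- the line is skipped
      have hskip : pvStepA (t, s) l = (t, s) := by
        simp only [pvKeepB, Bool.and_eq_true, bne_iff_ne, ne_eq, Bool.not_eq_true',
          not_and_or, not_not, Bool.not_eq_false] at hk
        simp only [pvStepA]
        rcases hk with h | h
        · rw [h]; simp
        · rw [h]; simp
      rw [hskip, ih, List.filter_cons_of_neg hk]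

theorem pvSliceEmpty : PySem.Str.slice "" none (some 250) = "" := by decide

-- ===== VERDICT (by name: the statement is the Claim_ definition above) =====
theorem extract_tldr_summary_py_spec : Claim_equal_extract_tldr_summary_py := by
  intro synthesis _
  show _ = _
  simp only [extract_tldr_summary_py, extract_tldr_summary_py_alt]
  rw [pvLoop_eq]
  set v := (((((((PySem.Str.split? synthesis "\n").getD []).map PySem.Str.strip).filter pvKeepB).map pvValB).filter (fun v => v != "")).head?).getD "" with hv
  set t' := (match ((((PySem.Str.split? synthesis "\n").getD []).map PySem.Str.strip).filter pvKeepB).filter pvIsTldrB |>.getLast? with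
             | some l => pvParseTldr l
             | none => ("" : String)) with ht'
  by_cases h1 : t' = "" <;> by_cases h2 : v = "" <;>
    simp [h1, h2, pvSliceEmpty]
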